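-- pv_equiv track=rewrite | github.com/TheAsianProphet/Codeforces-in-Python | Stones on the Table [Final].py | stone_clr
-- ===== SOURCE A (Python) =====
-- def stone_clr(new_lst):
--     new_lst2 = []
--     new_lst2.append(new_lst[0])
--     counter = 0
--     for x in range(len(new_lst)):
--         if new_lst[x] != new_lst2[counter]:
--             new_lst2.append(new_lst[x])
--             counter += 1
--
--     final = len(new_lst) - len(new_lst2)
--     return final
-- ===== SOURCE B (Python) =====
-- def stone_clr(new_lst):
--     prev = new_lst[0]
--     count = 0
--     for x in new_lst[1:]:
--         if x == prev:
--             count += 1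
--         prev = x
--     return count
-- ===== Notes on version B (the rewrite author's own statement) =====
-- stated objective: simpler
-- what changed: B replaces A's auxiliary compressed list and length subtraction with a single scalar prev/counter pass that directly counts adjacent equal stones.
import Mathlib
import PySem

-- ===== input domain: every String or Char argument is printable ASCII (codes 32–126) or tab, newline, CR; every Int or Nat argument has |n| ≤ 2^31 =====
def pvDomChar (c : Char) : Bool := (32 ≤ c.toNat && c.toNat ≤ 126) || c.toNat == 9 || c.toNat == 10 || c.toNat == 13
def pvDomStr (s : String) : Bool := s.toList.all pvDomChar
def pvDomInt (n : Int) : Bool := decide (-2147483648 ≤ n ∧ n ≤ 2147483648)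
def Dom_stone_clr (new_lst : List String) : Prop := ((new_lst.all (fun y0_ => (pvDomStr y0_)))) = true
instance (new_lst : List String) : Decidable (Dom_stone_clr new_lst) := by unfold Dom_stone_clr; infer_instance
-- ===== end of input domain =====

-- ===== PORT A =====
-- B replaces A's compressed-list-plus-length-subtraction with a direct prev/counter count of adjacent equal stones (simpler).
-- Raises on [] (new_lst[0]); excluded by Pre_.
def stoneA_step (new_lst : List String) (st : List String × Int) (x : Int) : List String × Int :=
  if PySem.List.pyGetD new_lst x "" ≠ PySem.List.pyGetD st.1 st.2 "" then
    (st.1 ++ [PySem.List.pyGetD new_lst x ""], st.2 + 1)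
  else st

def stone_clr (new_lst : List String) : Int :=
  let new_lst2 : List String := [PySem.List.pyGetD new_lst 0 ""]
  let st := (PySem.List.pyRange 0 (new_lst.length) 1).foldl (stoneA_step new_lst) (new_lst2, 0)
  (new_lst.length : Int) - (st.1.length : Int)

-- ===== PORT B =====
def stoneB_step (st : String × Int) (x : String) : String × Int :=
  (x, if x == st.1 then st.2 + 1 else st.2)

def stone_clr_alt (new_lst : List String) : Int :=
  match new_lst with
  | [] => 0   -- unreachable under Pre_ (Python B raises on [])
  | p :: t => (t.foldl stoneB_step (p, 0)).2

-- ===== PRECONDITION & SPEC =====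
-- Pre_ excludes only the empty list, on which both Pythons raise IndexError at new_lst[0].
def Pre_stone_clr (new_lst : List String) : Prop := new_lst ≠ []
instance (new_lst : List String) : Decidable (Pre_stone_clr new_lst) := by unfold Pre_stone_clr; infer_instance
def pvWitness_stone_clr : List String := ["a", "a", "b"]
def Spec_stone_clr (new_lst : List String) (out : Int) : Prop := out = stone_clr_alt new_lst
instance (new_lst : List String) (out : Int) : Decidable (Spec_stone_clr new_lst out) := by unfold Spec_stone_clr; infer_instance

-- ===== CLAIM (what is proved, stated in full; the proofs are below) =====
def Claim_equal_stone_clr : Prop := ∀ (new_lst : List String), Dom_stone_clr new_lst → Pre_stone_clr new_lst → Spec_stone_clr new_lst (stone_clr new_lst)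

-- ===== LEMMAS AND PROOFS =====

-- A's loop body as a function of the element value (stoneA_step looks the value up by index).
def gA (st : List String × Int) (v : String) : List String × Int :=
  if v ≠ PySem.List.pyGetD st.1 st.2 "" then (st.1 ++ [v], st.2 + 1) else st

lemma pyGetD_last (l2 : List String) (p : String) (h : l2.getLast? = some p) :
    PySem.List.pyGetD l2 ((l2.length : Int) - 1) "" = p := by
  have hne : l2 ≠ [] := by rintro rfl; simp at h
  have hlen : 0 < l2.length := List.length_pos_iff.mpr hne
  have hcast : (l2.length : Int) - 1 = ((l2.length - 1 : Nat) : Int) := by omega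
  rw [hcast, PySem.List.pyGetD_natCast]
  rw [List.getLast?_eq_getElem?] at h
  rw [List.getD_eq_getElem?_getD, h]
  rfl

lemma loop_inv (t : List String) : ∀ (l2 : List String) (p : String) (c : Int),
    l2.getLast? = some p →
    ((t.foldl gA (l2, (l2.length : Int) - 1)).1.length : Int) + (t.foldl stoneB_step (p, c)).2
      = (l2.length : Int) + (t.length : Int) + c := by
  induction t with
  | nil => intro l2 p c h; simp
  | cons x t ih =>
    intro l2 p c h
    by_cases hx : x = p
    · subst hx
      have h1 : gA (l2, (l2.length : Int) - 1) x = (l2, (l2.length : Int) - 1) := by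
        simp [gA, pyGetD_last l2 x h]
      have h2 : stoneB_step (x, c) x = (x, c + 1) := by simp [stoneB_step]
      simp only [List.foldl_cons, h1, h2, List.length_cons]
      have := ih l2 x (c + 1) h
      push_cast at this ⊢
      omega
    · have h1 : gA (l2, (l2.length : Int) - 1) x = (l2 ++ [x], (l2.length : Int)) := by
        simp [gA, pyGetD_last l2 p h, hx]
      have h2 : stoneB_step (p, c) x = (x, c) := by simp [stoneB_step, hx]
      simp only [List.foldl_cons, h1, h2, List.length_cons]
      have hih := ih (l2 ++ [x]) x c (by simp)
      have harr : ((l2 ++ [x]).length : Int) - 1 = (l2.length : Int) := by simp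
      rw [harr] at hih
      simp only [List.length_append, List.length_singleton] at hih
      push_cast at hih ⊢
      omega

-- ===== VERDICT (by name: the statement is the Claim_ definition above) =====
theorem stone_clr_spec : Claim_equal_stone_clr := by
  intro new_lst _ hpre
  obtain ⟨h, t, rfl⟩ := List.exists_cons_of_ne_nil hpre
  show stone_clr (h :: t) = stone_clr_alt (h :: t)
  have hA : stone_clr (h :: t) = ((h :: t).length : Int) -
      ((List.foldl (fun st x => gA st (PySem.List.pyGetD (h :: t) x ""))
        ([PySem.List.pyGetD (h :: t) 0 ""], 0)
        (PySem.List.pyRange 0 ((h :: t).length : Int) 1)).1.length : Int) := rfl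
  rw [hA, PySem.List.foldl_pyRange_zero_pyGetD' (h :: t) ""
        gA ([PySem.List.pyGetD (h :: t) 0 ""], 0)]
  have h0 : PySem.List.pyGetD (h :: t) 0 "" = h := PySem.List.pyGetD_zero_cons h t ""
  rw [h0]
  have hg : gA ([h], 0) h = ([h], ((([h] : List String).length : Int)) - 1) := by
    simp [gA, PySem.List.pyGetD_zero_cons]
  simp only [List.foldl_cons, hg]
  have hinv := loop_inv t [h] h 0 (by simp)
  simp only [stone_clr_alt, List.length_cons] at hinv ⊢
  simp only [List.length_nil] at hinv ⊢
  push_cast at hinv ⊢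
  omega
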